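-- pv_equiv track=rewrite | github.com/matteominin/SALMA-ArchValidator | convert_report_json.py | parse_simple_value
-- ===== SOURCE A (Python) =====
-- from typing import Any, Dict, List, Set
--
-- def parse_simple_value(text: str, start: int, known_keys: Set[str] = None) -> tuple[str, int]:
--     """
--     Parse a simple value (string, number, boolean, etc.)
--     Reads until we hit a delimiter (comma, closing bracket/brace)
--     """
--     value = ""
--     depth = 0
--     i = start
--
--     while i < len(text):
--         char = text[i]
--
--         # Track depth for nested structures
--         if char in '[{':
--             depth += 1
--             value += char
--             i += 1
--             continue
--         elif char in ']}':
--             if depth == 0: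
--                 # End of our value
--                 break
--             depth -= 1
--             value += char
--             i += 1
--             continue
--
--         # If depth is 0, check if we're at a delimiter
--         if depth == 0:
--             if char == ',':
--                 # Check if this comma is a field separator
--                 if known_keys:
--                     temp_i = i + 1
--                     while temp_i < len(text) and text[temp_i].isspace():
--                         temp_i += 1
--
--                     # Check if any known key starts here
--                     found_next_key = False
--                     for key in known_keys:
--                         if text[temp_i:temp_i+len(key)] == key:
--                             check_i = temp_i + len(key)
--                             while check_i < len(text) and text[check_i].isspace():
--                                 check_i += 1
--                             if check_i < len(text) and text[check_i] == '=':
--                                 found_next_key = True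
--                                 break
--
--                     if found_next_key:
--                         break
--                 else:
--                     # Without known keys, treat comma as end of value
--                     break
--
--                 value += char
--                 i += 1
--                 continue
--             elif char in ']}':
--                 break
--             else:
--                 value += char
--                 i += 1
--                 continue
--         else:
--             value += char
--             i += 1
--             continue
--
--     return value.strip(), i
-- ===== SOURCE B (Python) =====
-- def _field_sep_follows(text, j, keys):
--     n = len(text)
--     while j < n and text[j].isspace():
--         j += 1
--
--     def key_here(key):
--         k = j + len(key)
--         if text[j:k] != key:
--             return False
--         while k < n and text[k].isspace():
--             k += 1
--         return k < n and text[k] == '='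
--
--     return any(key_here(key) for key in keys)
--
--
-- def parse_simple_value(text, start, known_keys=None):
--     n = len(text)
--     i = start
--     depth = 0
--     while i < n:
--         c = text[i]
--         if depth == 0 and (c in ']}' or
--                            (c == ',' and (not known_keys or
--                                           _field_sep_follows(text, i + 1, known_keys)))):
--             break
--         depth += (c in '[{') - (c in ']}')
--         i += 1
--     return text[start:i].strip(), i
-- ===== Notes on version B (the rewrite author's own statement) =====
-- stated objective: simpler
-- what changed: B drops A's incremental string accumulator and its flag-based key-search loop: one index/depth scan with a single combined break condition and an arithmetic depth update, an any()-based lookahead helper, and the value recovered at the end as text[start:i].strip().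
-- outside the precondition, e.g. on parse_simple_value('ab', -1, None): A returns ('bab', 2), B returns ('b', 2); on parse_simple_value('a', -2, None): A raises IndexError, B raises IndexError
import Mathlib
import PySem

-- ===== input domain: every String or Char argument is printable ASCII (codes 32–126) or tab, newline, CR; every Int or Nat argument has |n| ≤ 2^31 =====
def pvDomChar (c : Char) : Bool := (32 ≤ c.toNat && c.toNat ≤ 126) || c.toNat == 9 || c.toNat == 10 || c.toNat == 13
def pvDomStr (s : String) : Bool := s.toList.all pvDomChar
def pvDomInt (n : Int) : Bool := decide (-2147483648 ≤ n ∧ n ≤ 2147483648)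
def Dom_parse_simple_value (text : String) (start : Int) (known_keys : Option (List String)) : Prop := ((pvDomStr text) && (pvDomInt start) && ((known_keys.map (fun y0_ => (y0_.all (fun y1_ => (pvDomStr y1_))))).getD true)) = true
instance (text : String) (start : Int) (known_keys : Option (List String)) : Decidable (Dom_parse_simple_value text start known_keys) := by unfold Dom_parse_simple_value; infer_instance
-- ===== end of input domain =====

-- B drops A's incremental accumulator and flag loop: one index/depth scan with a single
-- combined break condition and an arithmetic depth update, value recovered by slicing
-- (objective: simpler; equal on every input with 0 ≤ start, see Pre_).

-- ===== PORT A =====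
-- shared helper: the whitespace-skipping `while` loop, textually identical in A and B
def pvSkipWs (t : List Char) (j : Int) : Int :=
  if h : j < (t.length : Int) then
    if PySem.Chars.isspace (PySem.List.pyGetD t j ' ') then pvSkipWs t (j + 1) else j
  else j
termination_by ((t.length : Int) - j).toNat
decreasing_by omega

-- shared helper: the per-key test (slice comparison, skip spaces, check '='), identical in A and B
def pvKeyAt (t : List Char) (j : Int) (key : String) : Bool :=
  let k := key.toList
  if PySem.List.slice t (some j) (some (j + (k.length : Int))) = k then
    let c2 := pvSkipWs t (j + (k.length : Int))
    decide (c2 < (t.length : Int)) && (PySem.List.pyGetD t c2 ' ' == '=')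
  else false

-- A's `for key in known_keys: … found_next_key = True; break` flag loop
def pvFindKeyA (t : List Char) (j : Int) (keys : List String) : Bool :=
  match keys with
  | [] => false
  | key :: rest => if pvKeyAt t j key then true else pvFindKeyA t j rest

-- Python truthiness of `known_keys` (None or empty set is falsy)
def pvTruthy (kk : Option (List String)) : Bool :=
  match kk with
  | none => false
  | some l => !l.isEmpty

-- A's main while loop, state (value, depth, i); `none` from pyGet? is where Python
-- raises IndexError (start < -len(text)), excluded by Pre_
def pvALoop (t : List Char) (kk : Option (List String)) (v : List Char) (depth : Int) (i : Int) : List Char × Int :=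
  if h : i < (t.length : Int) then
    match PySem.List.pyGet? t i with
    | none => (v, i)
    | some c =>
      if c = '[' ∨ c = '{' then pvALoop t kk (v ++ [c]) (depth + 1) (i + 1)
      else if c = ']' ∨ c = '}' then
        if depth = 0 then (v, i)
        else pvALoop t kk (v ++ [c]) (depth - 1) (i + 1)
      else if depth = 0 then
        if c = ',' then
          if pvTruthy kk then
            if pvFindKeyA t (pvSkipWs t (i + 1)) (kk.getD []) then (v, i)
            else pvALoop t kk (v ++ [c]) depth (i + 1)
          else (v, i)
        else if c = ']' ∨ c = '}' then (v, i)
        else pvALoop t kk (v ++ [c]) depth (i + 1)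
      else pvALoop t kk (v ++ [c]) depth (i + 1)
  else (v, i)
termination_by ((t.length : Int) - i).toNat
decreasing_by all_goals omega

def parse_simple_value (text : String) (start : Int) (known_keys : Option (List String)) : String × Int :=
  let r := pvALoop text.toList known_keys [] 0 start
  (String.ofList (PySem.Chars.strip r.1), r.2)

-- ===== PORT B =====
-- B's lookahead helper: skip spaces once, then any() over the keys
def pvFieldSepB (t : List Char) (j : Int) (keys : List String) : Bool :=
  let j' := pvSkipWs t j
  keys.any (fun key => pvKeyAt t j' key)

-- B's single scan: no accumulator, one combined break condition, arithmetic depth update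
def pvBLoop (t : List Char) (kk : Option (List String)) (depth : Int) (i : Int) : Int :=
  if h : i < (t.length : Int) then
    match PySem.List.pyGet? t i with
    | none => i
    | some c =>
      if depth = 0 ∧ (c = ']' ∨ c = '}' ∨ (c = ',' ∧ (pvTruthy kk = false ∨ pvFieldSepB t (i + 1) (kk.getD []) = true))) then i
      else pvBLoop t kk (depth + (if c = '[' ∨ c = '{' then 1 else 0) - (if c = ']' ∨ c = '}' then 1 else 0)) (i + 1)
  else i
termination_by ((t.length : Int) - i).toNat
decreasing_by omega

def parse_simple_value_alt (text : String) (start : Int) (known_keys : Option (List String)) : String × Int :=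
  let t := text.toList
  let e := pvBLoop t known_keys 0 start
  (String.ofList (PySem.Chars.strip (PySem.List.slice t (some start) (some e))), e)

-- ===== PRECONDITION & SPEC =====
-- Pre_ excludes negative start: for start < -len(text) A raises IndexError, and for
-- -len(text) ≤ start < 0 A's value is assembled through Python's negative-index
-- wraparound, which can reread characters (e.g. text="ab", start=-1 yields "bab") —
-- an accident of A's indexing; B slices text[start:i] there.
def Pre_parse_simple_value (text : String) (start : Int) (known_keys : Option (List String)) : Prop := 0 ≤ start
instance (text : String) (start : Int) (known_keys : Option (List String)) : Decidable (Pre_parse_simple_value text start known_keys) := by unfold Pre_parse_simple_value; infer_instance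

def pvWitness_parse_simple_value : String × Int × Option (List String) := ("x y, a = 1", 0, some ["a"])

def Spec_parse_simple_value (text : String) (start : Int) (known_keys : Option (List String)) (out : String × Int) : Prop := out = parse_simple_value_alt text start known_keys
instance (text : String) (start : Int) (known_keys : Option (List String)) (out : String × Int) : Decidable (Spec_parse_simple_value text start known_keys out) := by unfold Spec_parse_simple_value; infer_instance

-- ===== CLAIM (what is proved, stated in full; the proofs are below) =====
def Claim_equal_parse_simple_value : Prop := ∀ (text : String) (start : Int) (known_keys : Option (List String)), Dom_parse_simple_value text start known_keys → Pre_parse_simple_value text start known_keys → Spec_parse_simple_value text start known_keys (parse_simple_value text start known_keys)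

-- ===== LEMMAS AND PROOFS =====

-- A's flag loop over the keys is B's any()
theorem pvFindKeyA_eq_any (t : List Char) (j : Int) (keys : List String) :
    pvFindKeyA t j keys = keys.any (fun key => pvKeyAt t j key) := by
  induction keys with
  | nil => simp [pvFindKeyA]
  | cons key rest ih => by_cases h : pvKeyAt t j key <;> simp [pvFindKeyA, h, ih]

-- B's lookahead equals A's (skip once, then scan the keys)
theorem pvFieldSepB_eq (t : List Char) (j : Int) (keys : List String) :
    pvFieldSepB t j keys = pvFindKeyA t (pvSkipWs t j) keys := by
  rw [pvFindKeyA_eq_any]; rfl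

theorem pvBLoop_ge (t : List Char) (kk : Option (List String)) (depth i : Int) :
    i ≤ pvBLoop t kk depth i := by
  fun_induction pvBLoop t kk depth i <;> (try simp only [dite_eq_ite] at *) <;> omega

theorem pv_slice_nil (t : List Char) (i : Int) :
    PySem.List.slice t (some i) (some i) = [] := by
  have h := PySem.List.length_slice t i i
  have h0 : (PySem.List.slice t (some i) (some i)).length = 0 := by omega
  exact List.eq_nil_of_length_eq_zero h0

theorem pv_slice_cons (t : List Char) (i e : Int) (c : Char) (h0 : 0 ≤ i) (hie : i < e)
    (hc : PySem.List.pyGet? t i = some c) :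
    PySem.List.slice t (some i) (some e) = c :: PySem.List.slice t (some (i + 1)) (some e) := by
  have h0e : (0:Int) ≤ e := by omega
  have hlt : i.toNat < t.length := by
    by_contra hge
    rw [PySem.List.pyGet?_of_nonneg t h0] at hc
    simp [List.getElem?_eq_none (by omega : t.length ≤ i.toNat)] at hc
  have hci : t[i.toNat] = c := by
    rw [PySem.List.pyGet?_of_nonneg t h0] at hc
    simpa [List.getElem?_eq_getElem hlt] using hc
  have h1 : (i + 1).toNat = i.toNat + 1 := by omega
  have h2 : e.toNat - i.toNat = (e.toNat - (i.toNat + 1)) + 1 := by omega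
  rw [PySem.List.slice_toNat t h0 h0e, PySem.List.slice_toNat t (by omega) h0e, h1]
  rw [List.drop_eq_getElem_cons hlt, h2, List.take_succ_cons, hci]

-- main invariant: A's loop result is (value = the slice from i to B's end index, that index)
theorem pvALoop_eq (t : List Char) (kk : Option (List String)) (v : List Char) (depth i : Int) :
    0 ≤ i → pvALoop t kk v depth i =
      (v ++ PySem.List.slice t (some i) (some (pvBLoop t kk depth i)), pvBLoop t kk depth i) := by
  fun_induction pvALoop t kk v depth i with
  | case1 v depth i hlt hc =>
    intro h0
    have hB : pvBLoop t kk depth i = i := by rw [pvBLoop]; simp [hlt, hc]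
    rw [hB, pv_slice_nil]; simp
  | case2 v depth i hlt c hc h1 ih =>
    intro h0
    have hB : pvBLoop t kk depth i = pvBLoop t kk (depth + 1) (i + 1) := by
      rcases h1 with rfl | rfl <;> (rw [pvBLoop]; simp [hlt, hc])
    have hge := pvBLoop_ge t kk (depth + 1) (i + 1)
    rw [ih (by omega), hB, pv_slice_cons t i _ c h0 (by omega) hc]
    simp
  | case3 v i hlt c hc h1 h2 =>
    intro h0
    have hB : pvBLoop t kk 0 i = i := by
      rcases h2 with rfl | rfl <;> (rw [pvBLoop]; simp [hlt, hc])
    rw [hB, pv_slice_nil]; simp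
  | case4 v depth i hlt c hc h1 h2 h3 ih =>
    intro h0
    have hB : pvBLoop t kk depth i = pvBLoop t kk (depth - 1) (i + 1) := by
      rcases h2 with rfl | rfl <;> (rw [pvBLoop]; simp [hlt, hc, h3])
    have hge := pvBLoop_ge t kk (depth - 1) (i + 1)
    rw [ih (by omega), hB, pv_slice_cons t i _ c h0 (by omega) hc]
    simp
  | case5 v i hlt htr hfk hc h1 h2 =>
    intro h0
    have hB : pvBLoop t kk 0 i = i := by
      rw [pvBLoop]; simp [hlt, hc, pvFieldSepB_eq, hfk]
    rw [hB, pv_slice_nil]; simp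
  | case6 v i hlt htr hfk hc h1 h2 ih =>
    intro h0
    have hB : pvBLoop t kk 0 i = pvBLoop t kk 0 (i + 1) := by
      rw [pvBLoop]; simp [hlt, hc, htr, pvFieldSepB_eq, hfk]
    have hge := pvBLoop_ge t kk 0 (i + 1)
    rw [ih (by omega), hB, pv_slice_cons t i _ ',' h0 (by omega) hc]
    simp
  | case7 v i hlt htr hc h1 h2 =>
    intro h0
    have hB : pvBLoop t kk 0 i = i := by
      rw [pvBLoop]; simp [hlt, hc, htr]
    rw [hB, pv_slice_nil]; simp
  | case8 v i hlt c hc h1 h2 h3 h4 => exact absurd h4 h2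
  | case9 v i hlt c hc h1 h2 h3 h4 ih =>
    intro h0
    obtain ⟨ha, hb⟩ := not_or.mp h2
    obtain ⟨hoa, hob⟩ := not_or.mp h1
    have hB : pvBLoop t kk 0 i = pvBLoop t kk 0 (i + 1) := by
      rw [pvBLoop]; simp [hlt, hc, ha, hb, h3, hoa, hob]
    have hge := pvBLoop_ge t kk 0 (i + 1)
    rw [ih (by omega), hB, pv_slice_cons t i _ c h0 (by omega) hc]
    simp
  | case10 v depth i hlt c hc h1 h2 h3 ih =>
    intro h0
    obtain ⟨ha, hb⟩ := not_or.mp h2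
    obtain ⟨hoa, hob⟩ := not_or.mp h1
    have hB : pvBLoop t kk depth i = pvBLoop t kk depth (i + 1) := by
      rw [pvBLoop]; simp [hlt, hc, ha, hb, h3, hoa, hob]
    have hge := pvBLoop_ge t kk depth (i + 1)
    rw [ih (by omega), hB, pv_slice_cons t i _ c h0 (by omega) hc]
    simp
  | case11 v depth i hlt =>
    intro h0
    have hB : pvBLoop t kk depth i = i := by rw [pvBLoop]; simp [hlt]
    rw [hB, pv_slice_nil]; simp

-- ===== VERDICT (by name: the statement is the Claim_ definition above) =====
theorem parse_simple_value_spec : Claim_equal_parse_simple_value := by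
  intro text start kk _hDom hPre
  unfold Spec_parse_simple_value
  simp only [parse_simple_value, parse_simple_value_alt]
  rw [pvALoop_eq text.toList kk [] 0 start hPre]
  simp
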